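-- pv_equiv track=rewrite | github.com/Sabrout/EditDistance-AAProject | EditDistance.py | med_greedy
-- ===== SOURCE A (Python) =====
-- def med_greedy(s1, s2, lookahead=3):
--     n = len(s1)
--     m = len(s2)
--     difference = abs(m - n)
--     # base cases
--     if n == 0 and m == 0:
--         return 0
--     if n == 0:
--         return m
--     if m == 0:
--         return n
--     # Greedy Approach
--     if difference > lookahead - 1 and m > lookahead - 1 and n > lookahead - 1:
--         if n > m:
--             return med_greedy(s1[:-lookahead], s2) + lookahead  # Deletion
--         if m > n:
--             return med_greedy(s1, s2[:-lookahead]) + lookahead  # Insertion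
--         if m == n:
--             temp = 0
--             for k in range(1, lookahead + 1):
--                 if s1[-k] != s2[-k]:
--                     temp += 1
--             return med_greedy(s1[:-lookahead], s2[:-lookahead]) + temp  # Substitution
--     else:
--         if n > m:
--             return med_greedy(s1[:-1], s2) + 1  # Deletion
--         if m > n:
--             return med_greedy(s1, s2[:-1]) + 1  # Insertion
--         if m == n:
--             return med_greedy(s1[:-1], s2[:-1]) + (s1[-1] != s2[-1])  # Substitution
-- ===== SOURCE B (Python) =====
-- def med_greedy(s1, s2, lookahead=3):
--     # Iterative version: walk two index pointers down from the ends instead of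
--     # recursively re-slicing the strings.  When the remaining lengths differ by
--     # at least `lookahead` (and both are long enough), a chunk of `lookahead`
--     # deletions/insertions is charged at once; note equal lengths can never
--     # satisfy that gap condition for lookahead >= 1, so the chunked branch only
--     # ever shrinks the longer side.
--     i, j = len(s1), len(s2)
--     cost = 0
--     while i > 0 and j > 0:
--         if abs(i - j) > lookahead - 1 and i > lookahead - 1 and j > lookahead - 1:
--             if i > j:
--                 i -= lookahead
--             else:
--                 j -= lookahead
--             cost += lookahead
--         elif i > j:
--             i -= 1
--             cost += 1
--         elif j > i:
--             j -= 1
--             cost += 1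
--         else:
--             cost += s1[i - 1] != s2[j - 1]
--             i -= 1
--             j -= 1
--     return cost + i + j
-- ===== Notes on version B (the rewrite author's own statement) =====
-- stated objective: faster
-- what changed: replaces A's recursion that re-slices (copies) both strings at every step by a single iterative loop over two end-index pointers and a cost accumulator (the chunked-substitution branch, unreachable for lookahead>=1, is dropped)
-- outside the precondition, e.g. on med_greedy('ab', 'cd', 0): A returns 0, B does not finish within the time limit
import Mathlib
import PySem

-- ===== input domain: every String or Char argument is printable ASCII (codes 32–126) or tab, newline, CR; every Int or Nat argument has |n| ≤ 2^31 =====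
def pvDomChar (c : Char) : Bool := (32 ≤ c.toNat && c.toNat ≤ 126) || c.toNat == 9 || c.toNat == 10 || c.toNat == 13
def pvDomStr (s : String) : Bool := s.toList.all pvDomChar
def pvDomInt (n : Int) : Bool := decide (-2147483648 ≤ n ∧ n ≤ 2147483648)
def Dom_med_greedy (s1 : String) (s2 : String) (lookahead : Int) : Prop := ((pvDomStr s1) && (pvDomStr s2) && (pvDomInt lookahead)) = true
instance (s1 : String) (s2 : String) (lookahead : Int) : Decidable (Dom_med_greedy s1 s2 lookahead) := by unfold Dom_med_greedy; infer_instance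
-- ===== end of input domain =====

-- B: iterative two-pointer loop instead of A's recursive re-slicing — asymptotically faster (no string copies).
-- ===== PORT A =====
-- fuel = s1.length + s2.length + 1 bounds A's recursion depth on every input admitted by Pre_.
def pvGoA (fuel : Nat) (a b : List Char) (L : Int) : Int :=
  match fuel with
  | 0 => 0
  | f + 1 =>
    let n : Int := a.length
    let m : Int := b.length
    let difference : Int := |m - n|
    if n = 0 ∧ m = 0 then 0
    else if n = 0 then m
    else if m = 0 then n
    else if difference > L - 1 ∧ m > L - 1 ∧ n > L - 1 then
      if n > m then pvGoA f (PySem.List.slice a none (some (-L))) b L + L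
      else if m > n then pvGoA f a (PySem.List.slice b none (some (-L))) L + L
      else
        let temp : Int := (PySem.List.pyRange 1 (L + 1) 1).foldl
          (fun t k => t + (if PySem.List.pyGet? a (-k) ≠ PySem.List.pyGet? b (-k) then 1 else 0)) 0
        pvGoA f (PySem.List.slice a none (some (-L))) (PySem.List.slice b none (some (-L))) L + temp
    else
      if n > m then pvGoA f (PySem.List.slice a none (some (-1))) b L + 1
      else if m > n then pvGoA f a (PySem.List.slice b none (some (-1))) L + 1
      else pvGoA f (PySem.List.slice a none (some (-1))) (PySem.List.slice b none (some (-1))) L +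
        (if PySem.List.pyGet? a (-1) ≠ PySem.List.pyGet? b (-1) then 1 else 0)

def med_greedy (s1 : String) (s2 : String) (lookahead : Int) : Int :=
  pvGoA (s1.toList.length + s2.toList.length + 1) s1.toList s2.toList lookahead

-- ===== PORT B =====
-- the while loop of Source B; fuel bounds the iteration count (enough on every input admitted by Pre_).
def pvGoB (fuel : Nat) (s1 s2 : List Char) (L i j cost : Int) : Int :=
  match fuel with
  | 0 => cost + i + j
  | f + 1 =>
    if i > 0 ∧ j > 0 then
      if |i - j| > L - 1 ∧ i > L - 1 ∧ j > L - 1 then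
        if i > j then pvGoB f s1 s2 L (i - L) j (cost + L)
        else pvGoB f s1 s2 L i (j - L) (cost + L)
      else if i > j then pvGoB f s1 s2 L (i - 1) j (cost + 1)
      else if j > i then pvGoB f s1 s2 L i (j - 1) (cost + 1)
      else pvGoB f s1 s2 L (i - 1) (j - 1)
        (cost + (if PySem.List.pyGet? s1 (i - 1) ≠ PySem.List.pyGet? s2 (j - 1) then 1 else 0))
    else cost + i + j

def med_greedy_alt (s1 : String) (s2 : String) (lookahead : Int) : Int :=
  pvGoB (s1.toList.length + s2.toList.length + 1) s1.toList s2.toList lookahead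
    s1.toList.length s2.toList.length 0

-- ===== PRECONDITION & SPEC =====
-- Pre_ restricts lookahead to the natural domain ≥ 1 (unless a string is empty, where neither
-- implementation looks at lookahead): with both strings nonempty, lookahead < 0 makes A recurse
-- forever (RecursionError) and lookahead = 0 makes A return an accidental value of its s[:-0]=''
-- slicing while B's pointer loop never advances.
def Pre_med_greedy (s1 : String) (s2 : String) (lookahead : Int) : Prop :=
  1 ≤ lookahead ∨ s1 = "" ∨ s2 = ""
instance (s1 : String) (s2 : String) (lookahead : Int) : Decidable (Pre_med_greedy s1 s2 lookahead) := by
  unfold Pre_med_greedy; infer_instance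
def pvWitness_med_greedy : String × String × Int := ("greedy", "greed", 3)
def Spec_med_greedy (s1 : String) (s2 : String) (lookahead : Int) (out : Int) : Prop := out = med_greedy_alt s1 s2 lookahead
instance (s1 : String) (s2 : String) (lookahead : Int) (out : Int) : Decidable (Spec_med_greedy s1 s2 lookahead out) := by unfold Spec_med_greedy; infer_instance

-- ===== CLAIM (what is proved, stated in full; the proofs are below) =====
def Claim_equal_med_greedy : Prop := ∀ (s1 : String) (s2 : String) (lookahead : Int), Dom_med_greedy s1 s2 lookahead → Pre_med_greedy s1 s2 lookahead → Spec_med_greedy s1 s2 lookahead (med_greedy s1 s2 lookahead)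

-- ===== LEMMAS AND PROOFS =====

lemma pvSlice (l : List Char) (x c : Int) (h0 : 0 ≤ x) (hx : x ≤ l.length) (hc : 1 ≤ c)
    (hcx : c ≤ x) :
    PySem.List.slice (l.take x.toNat) none (some (-c)) = l.take (x - c).toNat := by
  have h1 : -c = -((c.toNat : Nat) : Int) := by omega
  rw [h1, PySem.List.slice_to_neg_natCast _ _ (by omega), List.take_take]
  congr 1
  simp [List.length_take]
  omega

lemma pvLast (l : List Char) (x : Int) (h1 : 1 ≤ x) (hx : x ≤ l.length) :
    PySem.List.pyGet? (l.take x.toNat) (-1) = PySem.List.pyGet? l (x - 1) := by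
  rw [PySem.List.pyGet?_neg_one, PySem.List.pyGet?_of_nonneg (h := by omega)]
  rw [List.getLast?_eq_getElem?, List.getElem?_take]
  rw [if_pos (by simp [List.length_take]; omega)]
  congr 1
  simp [List.length_take]
  omega

lemma pvGoA_nil_left (f : Nat) (b : List Char) (L : Int) :
    pvGoA (f + 1) [] b L = b.length := by
  cases b with
  | nil => simp [pvGoA]
  | cons x t =>
    simp [pvGoA]
    try split_ifs
    all_goals omega

lemma pvGoB_zero_left (f : Nat) (s1 s2 : List Char) (L j cost : Int) :
    pvGoB f s1 s2 L 0 j cost = cost + 0 + j := by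
  cases f <;> simp [pvGoB]

lemma pvGoA_nil_right (f : Nat) (a : List Char) (L : Int) :
    pvGoA (f + 1) a [] L = a.length := by
  cases a with
  | nil => simp [pvGoA]
  | cons x t =>
    simp [pvGoA]
    try split_ifs
    all_goals omega

lemma pvGoB_zero_right (f : Nat) (s1 s2 : List Char) (L i cost : Int) :
    pvGoB f s1 s2 L i 0 cost = cost + i + 0 := by
  cases f <;> simp [pvGoB]

-- Correspondence invariant: B's pointer state (i, j) is A's pair of prefixes (s1[:i], s2[:j]).
lemma pvKey : ∀ (f : Nat) (s1 s2 : List Char) (L i j cost : Int),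
    1 ≤ L → 0 ≤ i → i ≤ s1.length → 0 ≤ j → j ≤ s2.length → i.toNat + j.toNat < f →
    pvGoB f s1 s2 L i j cost = cost + pvGoA f (s1.take i.toNat) (s2.take j.toNat) L := by
  intro f
  induction f with
  | zero => intro s1 s2 L i j cost _ _ _ _ _ hf; omega
  | succ f ih =>
    intro s1 s2 L i j cost hL h0i hi h0j hj hf
    have hA : ((s1.take i.toNat).length : Int) = i := by
      simp [List.length_take]; omega
    have hB : ((s2.take j.toNat).length : Int) = j := by
      simp [List.length_take]; omega
    by_cases hij : i > 0 ∧ j > 0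
    · obtain ⟨hi0, hj0⟩ := hij
      rw [pvGoB, pvGoA]
      simp only [hA, hB]
      rw [if_pos ⟨hi0, hj0⟩]
      rw [if_neg (by omega : ¬ (i = 0 ∧ j = 0)), if_neg (by omega : i ≠ 0),
        if_neg (by omega : j ≠ 0)]
      by_cases hg : |i - j| > L - 1 ∧ i > L - 1 ∧ j > L - 1
      · obtain ⟨hg1, hg2, hg3⟩ := hg
        have hgA : |j - i| > L - 1 ∧ j > L - 1 ∧ i > L - 1 :=
          ⟨by rw [abs_sub_comm]; exact hg1, hg3, hg2⟩
        rw [if_pos ⟨hg1, hg2, hg3⟩, if_pos hgA]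
        by_cases hij2 : i > j
        · rw [if_pos hij2, if_pos hij2]
          rw [pvSlice s1 i L h0i hi hL (by omega)]
          rw [ih s1 s2 L (i - L) j (cost + L) hL (by omega) (by omega) h0j hj (by omega)]
          ring
        · rw [if_neg hij2, if_neg hij2]
          have hji : j > i := by
            rcases lt_trichotomy i j with h | h | h
            · exact h
            · exfalso; rw [h] at hg1; simp at hg1; omega
            · exact absurd h hij2
          rw [if_pos hji]
          rw [pvSlice s2 j L h0j hj hL (by omega)]
          rw [ih s1 s2 L i (j - L) (cost + L) hL h0i hi (by omega) (by omega) (by omega)]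
          ring
      · have hgA : ¬ (|j - i| > L - 1 ∧ j > L - 1 ∧ i > L - 1) := by
          rw [abs_sub_comm]; tauto
        rw [if_neg hg, if_neg hgA]
        by_cases hij2 : i > j
        · rw [if_pos hij2, if_pos hij2]
          rw [pvSlice s1 i 1 h0i hi le_rfl (by omega)]
          rw [ih s1 s2 L (i - 1) j (cost + 1) hL (by omega) (by omega) h0j hj (by omega)]
          ring
        · rw [if_neg hij2, if_neg hij2]
          by_cases hji : j > i
          · rw [if_pos hji, if_pos hji]
            rw [pvSlice s2 j 1 h0j hj le_rfl (by omega)]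
            rw [ih s1 s2 L i (j - 1) (cost + 1) hL h0i hi (by omega) (by omega) (by omega)]
            ring
          · rw [if_neg hji, if_neg hji]
            rw [pvSlice s1 i 1 h0i hi le_rfl (by omega),
              pvSlice s2 j 1 h0j hj le_rfl (by omega)]
            rw [pvLast s1 i (by omega) hi, pvLast s2 j (by omega) hj]
            rw [ih s1 s2 L (i - 1) (j - 1) _ hL (by omega) (by omega) (by omega) (by omega)
              (by omega)]
            ring
    · rw [pvGoB, if_neg hij]
      rcases (by omega : i = 0 ∨ j = 0) with h | h
      · subst h
        simp only [Int.toNat_zero, List.take_zero]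
        rw [pvGoA_nil_left]
        omega
      · subst h
        simp only [Int.toNat_zero, List.take_zero]
        rw [pvGoA_nil_right]
        rw [hA]; omega


-- ===== VERDICT (by name: the statement is the Claim_ definition above) =====
theorem med_greedy_spec : Claim_equal_med_greedy := by
  intro s1 s2 L _ hpre
  unfold Spec_med_greedy med_greedy med_greedy_alt
  rcases hpre with hL | h | h
  · rw [pvKey _ s1.toList s2.toList L s1.toList.length s2.toList.length 0 hL
      (by omega) (by omega) (by omega) (by omega) (by omega)]
    rw [Int.toNat_natCast, Int.toNat_natCast, List.take_length, List.take_length, zero_add]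
  · subst h
    simp only [String.toList_empty, List.length_nil, Nat.cast_zero]
    rw [Nat.zero_add, pvGoA_nil_left, pvGoB_zero_left]
    omega
  · subst h
    simp only [String.toList_empty, List.length_nil, Nat.cast_zero]
    rw [pvGoA_nil_right, pvGoB_zero_right]
    omega
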